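-- pv_equiv track=rewrite | github.com/Rajath-55/DS-A | Python/fail.py | divideArr
-- ===== SOURCE A (Python) =====
-- def divideArr(arr, n):
--     lSum = 0
--     for i in range(n):
--         lSum += arr[i]
--         rSum = 0
--         for j in range(i+1, n):
--             rSum += arr[j]
--         if lSum == rSum:
--             return True
--     return False
-- ===== SOURCE B (Python) =====
-- def divideArr(arr, n):
--     total = 0
--     for i in range(n):
--         total += arr[i]
--     lSum = 0
--     for i in range(n):
--         lSum += arr[i]
--         if 2 * lSum == total:
--             return True
--     return False
-- ===== Notes on version B (the rewrite author's own statement) =====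
-- stated objective: faster
-- what changed: B precomputes the total of the first n elements once and compares 2*lSum with the total in a single pass, replacing A's inner loop that re-sums the suffix for every prefix.
import Mathlib
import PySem

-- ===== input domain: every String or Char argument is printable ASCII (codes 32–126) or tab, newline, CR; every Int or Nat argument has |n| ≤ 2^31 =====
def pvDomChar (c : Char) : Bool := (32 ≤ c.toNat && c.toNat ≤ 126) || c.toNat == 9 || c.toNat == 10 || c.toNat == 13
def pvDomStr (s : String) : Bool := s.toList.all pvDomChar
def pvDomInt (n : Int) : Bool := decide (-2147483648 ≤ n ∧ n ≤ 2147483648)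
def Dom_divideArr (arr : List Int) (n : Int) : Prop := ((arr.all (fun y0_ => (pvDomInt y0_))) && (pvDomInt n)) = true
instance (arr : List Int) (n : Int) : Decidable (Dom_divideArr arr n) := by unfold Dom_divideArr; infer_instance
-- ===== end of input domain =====

-- B replaces A's O(n^2) nested re-summing of the suffix by one precomputed total and a
-- single pass comparing 2*lSum with the total (asymptotically faster).

-- ===== PORT A =====
-- outer loop of A: for each index i, add arr[i] to lSum, recompute rSum over j in (i+1..n), early return on lSum == rSum
def divideArrGo (arr : List Int) (n : Int) (lSum : Int) : List Int → Bool
  | [] => false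
  | i :: rest =>
    let lSum' := lSum + (PySem.List.pyGet? arr i).getD 0
    let rSum := (PySem.List.pyRange (i + 1) n 1).foldl
      (fun s j => s + (PySem.List.pyGet? arr j).getD 0) 0
    if lSum' == rSum then true else divideArrGo arr n lSum' rest

def divideArr (arr : List Int) (n : Int) : Bool :=
  divideArrGo arr n 0 (PySem.List.pyRange 0 n 1)

-- ===== PORT B =====
-- single pass of B after the total has been computed: early return when 2*lSum == total
def divideArrAltGo (arr : List Int) (total lSum : Int) : List Int → Bool
  | [] => false
  | i :: rest =>
    let lSum' := lSum + (PySem.List.pyGet? arr i).getD 0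
    if 2 * lSum' == total then true else divideArrAltGo arr total lSum' rest

def divideArr_alt (arr : List Int) (n : Int) : Bool :=
  let total := (PySem.List.pyRange 0 n 1).foldl
    (fun s i => s + (PySem.List.pyGet? arr i).getD 0) 0
  divideArrAltGo arr total 0 (PySem.List.pyRange 0 n 1)

-- ===== PRECONDITION & SPEC =====
-- Pre_: arr[i] must exist for every i in range(n); for n > len(arr) both Pythons raise IndexError.
def Pre_divideArr (arr : List Int) (n : Int) : Prop := n ≤ (arr.length : Int)
instance (arr : List Int) (n : Int) : Decidable (Pre_divideArr arr n) := by
  unfold Pre_divideArr; infer_instance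
def pvWitness_divideArr : List Int × Int := ([1, 2, 3], 3)

def Spec_divideArr (arr : List Int) (n : Int) (out : Bool) : Prop := out = divideArr_alt arr n
instance (arr : List Int) (n : Int) (out : Bool) : Decidable (Spec_divideArr arr n out) := by
  unfold Spec_divideArr; infer_instance

-- ===== CLAIM (what is proved, stated in full; the proofs are below) =====
def Claim_equal_divideArr : Prop := ∀ (arr : List Int) (n : Int), Dom_divideArr arr n →
  Pre_divideArr arr n → Spec_divideArr arr n (divideArr arr n)

-- ===== LEMMAS AND PROOFS =====

-- sum of arr[i] over i ∈ range(0, k)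
def prefSum (arr : List Int) (k : Int) : Int :=
  ((PySem.List.pyRange 0 k 1).map (fun i => (PySem.List.pyGet? arr i).getD 0)).sum

theorem prefSum_split (arr : List Int) (k n : Int) (h0 : 0 ≤ k) (hkn : k ≤ n) :
    prefSum arr n = prefSum arr k +
      ((PySem.List.pyRange k n 1).map (fun i => (PySem.List.pyGet? arr i).getD 0)).sum := by
  unfold prefSum
  rw [PySem.List.pyRange_one_append 0 k n h0 hkn, List.map_append, List.sum_append]

theorem divideArrGo_eq (arr : List Int) (n : Int) (k : Int) (h0 : 0 ≤ k) (hkn : k ≤ n) :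
    divideArrGo arr n (prefSum arr k) (PySem.List.pyRange k n 1) =
    divideArrAltGo arr (prefSum arr n) (prefSum arr k) (PySem.List.pyRange k n 1) := by
  by_cases h : k < n
  · rw [PySem.List.pyRange_one_cons h]
    have hstep : prefSum arr k + (PySem.List.pyGet? arr k).getD 0 = prefSum arr (k + 1) := by
      unfold prefSum
      rw [PySem.List.pyRange_one_succ_right h0, List.map_append, List.sum_append]
      simp
    have hsplit := prefSum_split arr (k + 1) n (by omega) (by omega)
    simp only [divideArrGo, divideArrAltGo, hstep]
    have hiff : ((prefSum arr (k + 1)) ==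
        ((PySem.List.pyRange (k + 1) n 1).foldl
          (fun s j => s + (PySem.List.pyGet? arr j).getD 0) 0)) =
        ((2 * prefSum arr (k + 1)) == prefSum arr n) := by
      rw [PySem.List.foldl_add, zero_add, hsplit]
      simp only [beq_eq_decide]
      rw [decide_eq_decide]
      omega
    rw [hiff]
    split
    · rfl
    · exact divideArrGo_eq arr n (k + 1) (by omega) (by omega)
  · rw [PySem.List.pyRange_one_eq_nil (by omega)]
    rfl
termination_by (n - k).toNat
decreasing_by omega

-- ===== VERDICT (by name: the statement is the Claim_ definition above) =====
theorem divideArr_spec : Claim_equal_divideArr := by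
  intro arr n _ _
  unfold Spec_divideArr divideArr divideArr_alt
  by_cases hn : 0 ≤ n
  · rw [PySem.List.foldl_add]
    have h := divideArrGo_eq arr n 0 le_rfl hn
    simpa [prefSum] using h
  · rw [PySem.List.pyRange_one_eq_nil (by omega)]
    rfl
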